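-- pv_equiv track=rewrite | github.com/Pulkit3108/Codeforces-Problems | Round#584(Div. 1 + Div. 2)A.py | lot
-- ===== SOURCE A (Python) =====
-- def lot(A):
--     if(len(A)==0):
--         return(1)
--     elif(len(A)==1):
--         B=list()
--         return(lot(B)+1)
--     else:
--         A.sort()
--         B=list()
--         k=A[0]
--         for i in range(1,len(A)):
--             if(A[i]%k!=0):
--                 B.append(A[i])
--         return(lot(B)+1)
-- ===== SOURCE B (Python) =====
-- def lot(A):
--     A.sort()
--     count = 1
--     chosen = []
--     for x in A:
--         if all(x % c != 0 for c in chosen):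
--             chosen.append(x)
--             count += 1
--     return count
-- ===== Notes on version B (the rewrite author's own statement) =====
-- stated objective: alternative
-- what changed: Replaces the recursive filter-sort-and-recurse (one recursion level per round, re-sorting and rebuilding a list each level) by a single pass over the once-sorted list that maintains the list of chosen round minima and counts an element iff it is divisible by none of them; it trades A's recursion for an iterative pass with an accumulator.
import Mathlib
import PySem

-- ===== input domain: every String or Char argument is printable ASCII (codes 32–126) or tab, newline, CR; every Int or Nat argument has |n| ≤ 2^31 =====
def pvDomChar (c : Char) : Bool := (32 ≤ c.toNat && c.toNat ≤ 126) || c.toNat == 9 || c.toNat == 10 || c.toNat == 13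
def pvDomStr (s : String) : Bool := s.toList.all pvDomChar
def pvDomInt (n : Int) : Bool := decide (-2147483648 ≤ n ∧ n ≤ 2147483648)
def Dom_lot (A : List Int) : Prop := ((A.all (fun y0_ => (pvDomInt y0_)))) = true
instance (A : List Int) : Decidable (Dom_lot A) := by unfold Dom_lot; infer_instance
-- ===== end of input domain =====

-- B sorts once and counts round minima in one non-recursive pass over the sorted list instead of A's recursive re-sort-and-filter per round; both sort their argument in place in Python, the equivalence is about the return value.


-- A's inner loop (indices 1..len-1, keep elements not divisible by k) builds the filtered tail
-- (stated before the port: decreasing_by cites it by name)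
theorem lotA_loop_eq (S : List Int) (k : Int) :
    ((PySem.List.pyRange 1 (S.length : Int) 1).foldl
      (fun acc i => if PySem.Int.mod (PySem.List.pyGetD S i 0) k ≠ 0
                    then acc ++ [PySem.List.pyGetD S i 0] else acc) ([] : List Int))
      = (S.drop 1).filter (fun y => PySem.Int.mod y k != 0) := by
  rw [PySem.List.foldl_pyRange_pyGetD' S 0
        (fun acc y => if PySem.Int.mod y k ≠ 0 then acc ++ [y] else acc) [] (by norm_num)]
  rw [PySem.List.foldl_append_ite_eq_filter]
  have hp : (fun x => decide (PySem.Int.mod x k ≠ 0)) = (fun y => PySem.Int.mod y k != 0) := by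
    funext y; by_cases h : PySem.Int.mod y k = 0 <;> simp [h]
  rw [hp]
  simp

-- ===== PORT A =====
def lot (A : List Int) : Int :=
  if A.length = 0 then 1
  else if A.length = 1 then
    lot [] + 1
  else
    let S := PySem.List.sorted A (fun x => x) false
    let k := PySem.List.pyGetD S 0 0
    let B := (PySem.List.pyRange 1 (S.length : Int) 1).foldl
      (fun acc i => if PySem.Int.mod (PySem.List.pyGetD S i 0) k ≠ 0
                    then acc ++ [PySem.List.pyGetD S i 0] else acc) []
    lot B + 1
termination_by A.length
decreasing_by
  · simp
    omega
  · simp only [dite_eq_ite]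
    rw [lotA_loop_eq]
    have h1 := List.length_filter_le
      (fun y => PySem.Int.mod y (PySem.List.pyGetD (PySem.List.sorted A (fun x => x) false) 0 0) != 0)
      ((PySem.List.sorted A (fun x => x) false).drop 1)
    simp only [List.length_drop, PySem.List.length_sorted] at h1 ⊢
    omega

-- ===== PORT B =====
def lot_alt (A : List Int) : Int :=
  ((PySem.List.sorted A (fun x => x) false).foldl
    (fun (s : Int × List Int) x =>
      if s.2.all (fun c => PySem.Int.mod x c != 0)
      then (s.1 + 1, s.2 ++ [x]) else s)
    (1, [])).1

-- ===== PRECONDITION & SPEC =====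
-- Pre_ excludes exactly the inputs where Python A raises ZeroDivisionError: lists of
-- length ≥ 2 whose minimum is 0 (i.e. 0 present and no negative element); B raises there too.
def Pre_lot (A : List Int) : Prop := A.length ≤ 1 ∨ (0 : Int) ∉ A ∨ ∃ x ∈ A, x < 0
instance (A : List Int) : Decidable (Pre_lot A) := by unfold Pre_lot; infer_instance
def pvWitness_lot : List Int := [6, 2, 3, 4]
def Spec_lot (A : List Int) (out : Int) : Prop := out = lot_alt A
instance (A : List Int) (out : Int) : Decidable (Spec_lot A out) := by unfold Spec_lot; infer_instance

-- ===== CLAIM (what is proved, stated in full; the proofs are below) =====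
def Claim_equal_lot : Prop := ∀ (A : List Int), Dom_lot A → Pre_lot A → Spec_lot A (lot A)

-- ===== LEMMAS AND PROOFS =====

-- B's loop body, named for the proofs
def lotStep : Int × List Int → Int → Int × List Int :=
  fun s x => if s.2.all (fun c => PySem.Int.mod x c != 0) then (s.1 + 1, s.2 ++ [x]) else s

theorem lot_alt_eq (A : List Int) :
    lot_alt A = ((PySem.List.sorted A (fun x => x) false).foldl lotStep (1, [])).1 := rfl

theorem mod_zero_left (x : Int) : PySem.Int.mod 0 x = 0 :=
  (PySem.Int.mod_eq_zero_iff_dvd 0 x).mpr (dvd_zero x)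

theorem lot_nil : lot [] = 1 := by rw [lot.eq_def]; simp

theorem lot_single (x : Int) : lot [x] = 2 := by rw [lot.eq_def]; simp [lot_nil]

-- a chosen divisor stays chosen
theorem lotStep_mem (s : Int × List Int) (y d : Int) (hs : d ∈ s.2) : d ∈ (lotStep s y).2 := by
  unfold lotStep
  split
  · simpa using Or.inl hs
  · exact hs

-- multiples of an already-chosen divisor are skipped by the rest of the pass
theorem lotStep_skip (d : Int) (l : List Int) :
    ∀ s : Int × List Int, d ∈ s.2 →
      l.foldl lotStep s = (l.filter (fun y => PySem.Int.mod y d != 0)).foldl lotStep s := by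
  induction l with
  | nil => intro s _; rfl
  | cons y l ih =>
    intro s hs
    by_cases hmod : PySem.Int.mod y d = 0
    · have hall : (s.2.all (fun c => PySem.Int.mod y c != 0)) = false := by
        rw [List.all_eq_false]
        exact ⟨d, hs, by simp [hmod]⟩
      have hstep : lotStep s y = s := by unfold lotStep; rw [hall]; simp
      simp only [List.filter_cons, List.foldl_cons, hmod]
      simp only [bne_self_eq_false, Bool.false_eq_true, if_false, hstep]
      exact ih s hs
    · have hbne : (PySem.Int.mod y d != 0) = true := by simp [hmod]
      simp only [List.filter_cons, hbne, if_true, List.foldl_cons]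
      exact ih (lotStep s y) (lotStep_mem s y d hs)

-- main invariant: starting the pass on sorted S with chosen divisors C (all nonzero,
-- dividing nothing in S) adds exactly (lot S - 1) to the counter
theorem lot_key : ∀ (n : Nat) (S : List Int), S.length ≤ n →
    S.Pairwise (· ≤ ·) →
    ∀ (C : List Int) (c : Int),
      (∀ d ∈ C, d ≠ 0) →
      (∀ x ∈ S, ∀ d ∈ C, PySem.Int.mod x d ≠ 0) →
      (S.head? = some 0 → S.length = 1) →
      (S.foldl lotStep (c, C)).1 = c + lot S - 1 := by
  intro n
  induction n with
  | zero =>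
    intro S hlen _ C c _ _ _
    have : S = [] := List.length_eq_zero_iff.mp (Nat.le_zero.mp hlen)
    subst this
    simp [lot_nil]
  | succ n ih =>
    intro S hlen hs C c hC hdiv h0
    cases S with
    | nil => simp [lot_nil]
    | cons x xs =>
      have hallx : ((C.all (fun ch => PySem.Int.mod x ch != 0))) = true := by
        rw [List.all_eq_true]
        intro d hd
        simpa using hdiv x (by simp) d hd
      have hstep : lotStep (c, C) x = (c + 1, C ++ [x]) := by
        unfold lotStep; rw [hallx]; simp
      cases xs with
      | nil =>
        simp only [List.foldl_cons, List.foldl_nil, hstep, lot_single]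
        omega
      | cons y ys =>
        have hxne : x ≠ 0 := by
          intro hx
          have := h0 (by simp [hx])
          simp at this
        have hskip := lotStep_skip x (y :: ys) (c + 1, C ++ [x]) (by simp)
        set xs' := (y :: ys).filter (fun z => PySem.Int.mod z x != 0) with hxs'
        have hlen' : xs'.length ≤ n := by
          have h1 : xs'.length ≤ (y :: ys).length := List.length_filter_le _ _
          simp only [List.length_cons] at h1 hlen
          omega
        have hs' : xs'.Pairwise (· ≤ ·) := ((List.pairwise_cons.mp hs).2).filter _
        have hC' : ∀ d ∈ C ++ [x], d ≠ 0 := by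
          intro d hd
          rcases List.mem_append.mp hd with h | h
          · exact hC d h
          · simp at h; omega
        have hdiv' : ∀ z ∈ xs', ∀ d ∈ C ++ [x], PySem.Int.mod z d ≠ 0 := by
          intro z hz d hd
          have hzmem := List.mem_of_mem_filter hz
          rcases List.mem_append.mp hd with h | h
          · exact hdiv z (by simp [hzmem]) d h
          · have hp := List.of_mem_filter hz
            simp at h
            subst h
            simpa using hp
        have h0' : xs'.head? = some 0 → xs'.length = 1 := by
          intro hh
          exfalso
          have h0mem : (0 : Int) ∈ xs' := by
            cases hx : xs' with
            | nil => simp [hx] at hh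
            | cons a t => simp [hx] at hh; simp [hh]
          have hp := List.of_mem_filter h0mem
          rw [mod_zero_left] at hp
          simp at hp
        have hres := ih xs' hlen' hs' (C ++ [x]) (c + 1) hC' hdiv' h0'
        have hlot : lot (x :: y :: ys) = lot xs' + 1 := by
          rw [lot.eq_def]
          simp only [List.length_cons]
          rw [if_neg (by omega), if_neg (by omega)]
          rw [PySem.List.sorted_eq_self_of_pairwise _ _ hs]
          rw [lotA_loop_eq]
          simp [hxs']
        rw [List.foldl_cons, hstep, hskip, hres, hlot]
        omega

-- lot is invariant under pre-sorting (A sorts first thing anyway)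
theorem lot_sorted (A : List Int) :
    lot (PySem.List.sorted A (fun x => x) false) = lot A := by
  rcases A with _ | ⟨a, _ | ⟨b, t⟩⟩
  · rfl
  · rw [PySem.List.sorted_eq_self_of_pairwise [a] (fun x => x) (by simp)]
  · have hlen : (PySem.List.sorted (a :: b :: t) (fun x => x) false).length = t.length + 2 := by
      simp [PySem.List.length_sorted]
    conv_lhs => rw [lot.eq_def]
    conv_rhs => rw [lot.eq_def]
    simp only [hlen, List.length_cons]
    rw [if_neg (by omega), if_neg (by omega), if_neg (by omega), if_neg (by omega)]
    simp only [PySem.List.sorted_sorted, hlen]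

-- ===== VERDICT (by name: the statement is the Claim_ definition above) =====
theorem lot_spec : Claim_equal_lot := by
  intro A _ hpre
  unfold Spec_lot
  rw [lot_alt_eq]
  set S := PySem.List.sorted A (fun x => x) false with hS
  have hs : S.Pairwise (· ≤ ·) := by
    simpa using PySem.List.sorted_pairwise A (fun x => x)
  have h0 : S.head? = some 0 → S.length = 1 := by
    intro hh
    cases hSc : S with
    | nil => simp [hSc] at hh
    | cons m t =>
      rw [hSc] at hh; simp at hh; subst hh
      have hmin : ∀ y ∈ A, (0 : Int) ≤ y := by
        intro y hy
        simpa using PySem.List.key_head_sorted_le A (fun x => x) (hS ▸ hSc) y hy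
      have hmem : (0 : Int) ∈ A := by
        have h1 : (0 : Int) ∈ S := by simp [hSc]
        rwa [PySem.List.mem_sorted] at h1
      rcases hpre with h | h | ⟨x, hx, hxlt⟩
      · have h2 : S.length = A.length := PySem.List.length_sorted ..
        rw [hSc] at h2
        simp only [List.length_cons] at h2
        simp only [List.length_cons]
        omega
      · exact absurd hmem h
      · exact absurd (hmin x hx) (by omega)
  have hk := lot_key S.length S le_rfl hs [] 1 (by simp) (by simp) h0
  rw [hk, lot_sorted]
  omega
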